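-- pv_equiv track=rewrite | github.com/DyogenIBENS/Agora | src/utils/myGenomes.py | getDiNuc
-- ===== SOURCE A (Python) =====
-- def getDiNuc(seq, x1, x2, sel):
--     n = 0
--     gc = 0
--     for x in range(x1, x2):
--         s = seq[x:x+2]
--         if "N" in s:
--             continue
--         n += 1
--         if s in sel:
--             gc += 1
--     return (n,gc)
-- ===== SOURCE B (Python) =====
-- def getDiNuc(seq, x1, x2, sel):
--     counts = {}
--     for x in range(x1, x2):
--         s = seq[x:x+2]
--         if "N" not in s:
--             counts[s] = counts.get(s, 0) + 1
--     n = sum(counts.values())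
--     sel_total = sum(counts.get(d, 0) for d in set(sel))
--     return (n, sel_total)
-- ===== Notes on version B (the rewrite author's own statement) =====
-- stated objective: alternative
-- what changed: B builds a frequency table of the valid (N-free) window slices in one pass and then derives n as the sum of the table's counts and gc by aggregating the counts of the distinct selected dinucleotides, replacing A's per-position membership test against sel.
import Mathlib
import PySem

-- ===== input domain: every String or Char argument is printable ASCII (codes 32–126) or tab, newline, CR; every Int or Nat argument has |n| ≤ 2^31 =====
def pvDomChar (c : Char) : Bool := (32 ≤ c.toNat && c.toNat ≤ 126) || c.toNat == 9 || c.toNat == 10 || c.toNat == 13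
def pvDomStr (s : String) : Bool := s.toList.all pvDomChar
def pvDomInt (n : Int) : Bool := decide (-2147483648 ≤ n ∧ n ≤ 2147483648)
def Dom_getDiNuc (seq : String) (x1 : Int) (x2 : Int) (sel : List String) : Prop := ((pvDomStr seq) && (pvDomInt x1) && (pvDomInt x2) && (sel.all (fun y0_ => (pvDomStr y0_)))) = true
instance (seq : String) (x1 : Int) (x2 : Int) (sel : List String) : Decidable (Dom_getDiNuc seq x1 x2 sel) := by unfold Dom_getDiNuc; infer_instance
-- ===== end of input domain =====

-- B replaces A's per-position membership test against sel with a one-pass frequency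
-- table of the N-free slices followed by an aggregation over the distinct selected keys
-- (alternative decomposition; same results).

-- ===== PORT A =====
def getDiNuc (seq : String) (x1 : Int) (x2 : Int) (sel : List String) : Int × Int :=
  (PySem.List.pyRange x1 x2 1).foldl
    (fun (st : Int × Int) x =>
      let s := PySem.Str.slice seq (some x) (some (x + 2))
      if PySem.Str.isIn "N" s then st
      else (st.1 + 1, if s ∈ sel then st.2 + 1 else st.2))
    (0, 0)

-- ===== PORT B =====
def getDiNuc_alt (seq : String) (x1 : Int) (x2 : Int) (sel : List String) : Int × Int :=
  let counts : PySem.Dict String Int :=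
    (PySem.List.pyRange x1 x2 1).foldl
      (fun d x =>
        let s := PySem.Str.slice seq (some x) (some (x + 2))
        if PySem.Str.isIn "N" s then d else d.modify s 0 (· + 1))
      PySem.Dict.empty
  let n : Int := counts.values.sum
  let gc : Int := ((PySem.Set.ofList sel).map (fun d => counts.getD d 0)).sum
  (n, gc)

-- ===== PRECONDITION & SPEC =====
def Spec_getDiNuc (seq : String) (x1 : Int) (x2 : Int) (sel : List String) (out : Int × Int) : Prop := out = getDiNuc_alt seq x1 x2 sel
instance (seq : String) (x1 : Int) (x2 : Int) (sel : List String) (out : Int × Int) : Decidable (Spec_getDiNuc seq x1 x2 sel out) := by unfold Spec_getDiNuc; infer_instance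

-- ===== CLAIM (what is proved, stated in full; the proofs are below) =====
def Claim_equal_getDiNuc : Prop := ∀ (seq : String) (x1 : Int) (x2 : Int) (sel : List String), Dom_getDiNuc seq x1 x2 sel → Spec_getDiNuc seq x1 x2 sel (getDiNuc seq x1 x2 sel)

-- ===== LEMMAS AND PROOFS =====

theorem indSum (a : String) (K : List String) (hK : K.Nodup) :
    (K.map (fun k => if k = a then (1:Int) else 0)).sum = if a ∈ K then 1 else 0 := by
  induction K with
  | nil => simp
  | cons b K ih =>
    simp only [List.nodup_cons] at hK
    simp only [List.map_cons, List.sum_cons, ih hK.2, List.mem_cons]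
    by_cases hab : a = b
    · subst hab; simp [hK.1]
    · simp [hab, Ne.symm hab]

theorem countSum (K : List String) (hK : K.Nodup) (l : List String) :
    (K.map (fun k => (l.count k : Int))).sum
      = ((l.filter (fun s => decide (s ∈ K))).length : Int) := by
  induction l with
  | nil => simp
  | cons a l ih =>
    have hmap : K.map (fun k => (((a :: l).count k : Nat) : Int))
        = K.map (fun k => ((l.count k : Nat) : Int) + if k = a then (1:Int) else 0) := by
      apply List.map_congr_left
      intro k _
      rw [List.count_cons]
      by_cases h : k = a
      · simp [h]
      · simp [h, Ne.symm h]
    rw [hmap, List.sum_map_add, indSum a K hK, ih]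
    by_cases ha : a ∈ K <;> simp [ha]

theorem aLoop (pN : String → Bool) (sel : List String) (L : List String) (n gc : Int) :
    L.foldl (fun (st : Int × Int) s =>
        if pN s then st
        else (st.1 + 1, if s ∈ sel then st.2 + 1 else st.2)) (n, gc)
      = (n + ((L.filter (fun s => !pN s)).length : Int),
         gc + (((L.filter (fun s => !pN s)).filter
                 (fun s => decide (s ∈ sel))).length : Int)) := by
  induction L generalizing n gc with
  | nil => simp
  | cons s L ih =>
    by_cases hN : pN s
    · simp [hN, ih]
    · by_cases hs : s ∈ sel <;> simp [hN, hs, ih] <;> (try constructor) <;>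
        first | trivial | (push_cast; ring)

theorem main (seq : String) (x1 x2 : Int) (sel : List String) :
    (PySem.List.pyRange x1 x2 1).foldl
      (fun (st : Int × Int) x =>
        let s := PySem.Str.slice seq (some x) (some (x + 2))
        if PySem.Str.isIn "N" s then st
        else (st.1 + 1, if s ∈ sel then st.2 + 1 else st.2)) (0, 0)
    = (let counts : PySem.Dict String Int :=
        (PySem.List.pyRange x1 x2 1).foldl
          (fun d x =>
            let s := PySem.Str.slice seq (some x) (some (x + 2))
            if PySem.Str.isIn "N" s then d else d.modify s 0 (· + 1))
          PySem.Dict.empty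
       let n : Int := counts.values.sum
       let gc : Int := ((PySem.Set.ofList sel).map (fun d => counts.getD d 0)).sum
       (n, gc)) := by
  set f : Int → String := fun x => PySem.Str.slice seq (some x) (some (x + 2)) with hf
  set pN : String → Bool := fun s => PySem.Str.isIn "N" s with hpN
  set L : List String := (PySem.List.pyRange x1 x2 1).map f with hL
  set keep : List String := L.filter (fun s => !pN s) with hkeep
  -- A side
  have hA : (PySem.List.pyRange x1 x2 1).foldl
      (fun (st : Int × Int) x =>
        let s := f x
        if pN s then st
        else (st.1 + 1, if s ∈ sel then st.2 + 1 else st.2)) (0, 0)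
      = ((keep.length : Int), ((keep.filter (fun s => decide (s ∈ sel))).length : Int)) := by
    have h := aLoop pN sel L 0 0
    rw [hL, List.foldl_map] at h
    simp only [zero_add] at h
    exact h
  -- B side: the dict is the counter of keep
  have hB : (PySem.List.pyRange x1 x2 1).foldl
      (fun (d : PySem.Dict String Int) x =>
        let s := f x
        if pN s then d else d.modify s 0 (· + 1)) PySem.Dict.empty
      = PySem.Dict.counter keep := by
    suffices h : L.foldl (fun (d : PySem.Dict String Int) s =>
        if pN s then d else d.modify s 0 (· + 1)) PySem.Dict.empty
        = PySem.Dict.counter keep by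
      rw [hL, List.foldl_map] at h
      exact h
    have h1 : L.foldl (fun (d : PySem.Dict String Int) s =>
        if pN s then d else d.modify s 0 (· + 1)) PySem.Dict.empty
        = L.foldl (fun (d : PySem.Dict String Int) s =>
            if (!pN s) then d.modify s 0 (· + 1) else d) PySem.Dict.empty := by
      congr 1
      funext d s
      by_cases h : pN s <;> simp [h]
    rw [h1, ← List.foldl_filter, ← hkeep, PySem.Dict.counter_eq_foldl]
  have hnodup := PySem.Dict.nodup_keys_counter (xs := keep)
  have hvals : (PySem.Dict.counter keep).values.sum = (keep.length : Int) := by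
    rw [PySem.Dict.values_eq_map_keys _ hnodup 0, PySem.Dict.keys_counter]
    have hmc : (PySem.Set.ofList keep).map (fun k => (PySem.Dict.counter keep).getD k 0)
        = (PySem.Set.ofList keep).map (fun k => (keep.count k : Int)) := by
      apply List.map_congr_left; intro k _; rw [PySem.Dict.getD_counter]
    rw [hmc, countSum _ (PySem.Set.nodup_ofList keep) keep]
    congr 1
    rw [List.filter_eq_self.mpr]
    intro s hs
    simp [PySem.Set.mem_ofList, hs]
  have hgc : ((PySem.Set.ofList sel).map (fun d => (PySem.Dict.counter keep).getD d 0)).sum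
      = ((keep.filter (fun s => decide (s ∈ sel))).length : Int) := by
    have hmc : (PySem.Set.ofList sel).map (fun k => (PySem.Dict.counter keep).getD k 0)
        = (PySem.Set.ofList sel).map (fun k => (keep.count k : Int)) := by
      apply List.map_congr_left; intro k _; rw [PySem.Dict.getD_counter]
    rw [hmc, countSum _ (PySem.Set.nodup_ofList sel) keep]
    congr 1
    congr 1
    apply List.filter_congr
    intro s _
    simp [PySem.Set.mem_ofList]
  simp only []
  rw [hA, hB, hvals, hgc]

-- ===== VERDICT (by name: the statement is the Claim_ definition above) =====
theorem getDiNuc_spec : Claim_equal_getDiNuc := by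
  intro seq x1 x2 sel _
  unfold Spec_getDiNuc getDiNuc getDiNuc_alt
  exact main seq x1 x2 sel
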